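-- pv_equiv track=rewrite | github.com/Ronopoldo/homework | 11-grade/TRIALEGE_2023_12_5/24.py | searchDelta
-- ===== SOURCE A (Python) =====
-- def searchDelta(arr):
--     outArr = []
--     for x in range(len(arr) - 1):
--         for y in range(len(arr)):
--             if arr[x] == arr[y]:
--                 outArr.append(abs(y-x))
--                 break
--
--     return outArr[:-1:]
-- ===== SOURCE B (Python) =====
-- def searchDelta(arr):
--     positions = {}
--     for i, v in enumerate(arr):
--         positions.setdefault(v, []).append(i)
--     result = [0] * len(arr)
--     for ps in positions.values():
--         f = ps[0]
--         for p in ps: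
--             result[p] = p - f
--     return result[:len(arr) - 2]
-- ===== Notes on version B (the rewrite author's own statement) =====
-- stated objective: faster
-- what changed: Instead of A's per-position forward rescan, B builds a dict grouping each value to the list of its positions in one pass, then scatters p - first_position into a preallocated result array for every group and truncates; the answer is assembled by value groups, not position by position.
import Mathlib
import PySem

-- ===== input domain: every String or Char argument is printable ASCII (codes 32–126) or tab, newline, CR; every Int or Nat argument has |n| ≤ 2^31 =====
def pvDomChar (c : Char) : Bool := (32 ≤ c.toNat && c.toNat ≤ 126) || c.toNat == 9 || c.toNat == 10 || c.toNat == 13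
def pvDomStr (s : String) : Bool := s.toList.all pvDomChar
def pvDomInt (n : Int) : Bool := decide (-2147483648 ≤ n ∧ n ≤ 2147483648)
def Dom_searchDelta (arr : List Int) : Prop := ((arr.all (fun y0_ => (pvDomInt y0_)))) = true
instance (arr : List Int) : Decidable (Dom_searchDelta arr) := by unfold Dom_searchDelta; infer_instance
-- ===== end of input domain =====

-- B replaces A's quadratic per-position rescans by grouping positions per value in a dict and scattering p - first into a preallocated result list; same return value.

-- ===== PORT A =====
-- inner 'for y in range(len(arr)): if arr[x] == arr[y]: outArr.append(abs(y-x)); break'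
def searchDeltaInner (arr : List Int) (x : Int) (out : List Int) : List Int → List Int
  | [] => out
  | y :: ys =>
    if PySem.List.pyGetD arr x 0 == PySem.List.pyGetD arr y 0 then out ++ [|y - x|]
    else searchDeltaInner arr x out ys

def searchDelta (arr : List Int) : List Int :=
  let outArr := (PySem.List.pyRange 0 ((arr.length : Int) - 1) 1).foldl
    (fun out x => searchDeltaInner arr x out (PySem.List.pyRange 0 (arr.length : Int) 1)) []
  PySem.List.slice outArr none (some (-1))

-- ===== PORT B =====
def searchDelta_alt (arr : List Int) : List Int :=
  -- positions.setdefault(v, []).append(i)  ==  positions[v] = positions.get(v, []) + [i]  ==  Dict.modify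
  let groups := (PySem.List.enumerate arr 0).foldl
    (fun (d : PySem.Dict Int (List Int)) p => d.modify p.2 [] (fun l => l ++ [p.1])) PySem.Dict.empty
  let result := groups.values.foldl
    (fun res ps =>
      let f := PySem.List.pyGetD ps 0 0   -- ps[0]; every group list is nonempty, so Python never raises here
      ps.foldl (fun res p => PySem.List.pySetD res p (p - f)) res)
    (List.replicate arr.length 0)
  PySem.List.slice result none (some ((arr.length : Int) - 2))

-- ===== PRECONDITION & SPEC =====
def Spec_searchDelta (arr : List Int) (out : List Int) : Prop := out = searchDelta_alt arr
instance (arr : List Int) (out : List Int) : Decidable (Spec_searchDelta arr out) := by unfold Spec_searchDelta; infer_instance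

-- ===== CLAIM (what is proved, stated in full; the proofs are below) =====
def Claim_equal_searchDelta : Prop := ∀ (arr : List Int), Dom_searchDelta arr → Spec_searchDelta arr (searchDelta arr)

-- ===== LEMMAS AND PROOFS =====

-- first-occurrence index of v in t (proof-only characterisation of both programs)
def fIdx (v : Int) : List Int → Nat
  | [] => 0
  | a :: t => if a = v then 0 else fIdx v t + 1

-- the common value both programs compute at position x
def gfun (t : List Int) (x : Nat) : Int := (x : Int) - (fIdx (t.getD x 0) t : Int)

theorem fi_le (t : List Int) (v : Int) (x : Nat) (hx : x < t.length) (hv : t[x] = v) :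
    fIdx v t ≤ x := by
  induction t generalizing x with
  | nil => simp at hx
  | cons a s ih =>
    cases x with
    | zero => simp at hv; simp [fIdx, hv]
    | succ n =>
      simp at hv hx
      by_cases ha : a = v
      · simp [fIdx, ha]
      · simpa [fIdx, ha] using ih n hx hv

theorem find_range (t : List Int) (v : Int) (hv : v ∈ t) :
    (List.range t.length).find? (fun y => v == t.getD y 0) = some (fIdx v t) := by
  induction t with
  | nil => simp at hv
  | cons a s ih =>
    rw [List.length_cons, List.range_succ_eq_map]
    by_cases ha : a = v
    · simp [ha, fIdx]
    · have hv' : v ∈ s := by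
        rcases List.mem_cons.mp hv with h | h
        · exact absurd h.symm ha
        · exact h
      have hne : (v == a) = false := by simp [Ne.symm ha]
      rw [List.find?_cons_of_neg (by simp [hne])]
      rw [List.find?_map]
      have hcomp : ((fun y => v == (a :: s).getD y 0) ∘ Nat.succ) = (fun y => v == s.getD y 0) := by
        funext y; simp [List.getD]
      rw [hcomp, ih hv']
      simp [fIdx, ha]

-- A's inner loop appends |firstmatch - x| (found by find?)
theorem inner_eq_find (arr : List Int) (x : Int) (out ys : List Int) :
    searchDeltaInner arr x out ys =
      match ys.find? (fun y => PySem.List.pyGetD arr x 0 == PySem.List.pyGetD arr y 0) with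
      | some y => out ++ [|y - x|]
      | none => out := by
  induction ys with
  | nil => simp [searchDeltaInner]
  | cons y ys ih =>
    by_cases h : PySem.List.pyGetD arr x 0 == PySem.List.pyGetD arr y 0
    · rw [searchDeltaInner, if_pos (by simpa using h)]
      simp [h]
    · rw [searchDeltaInner, if_neg (by simpa using h), ih]
      simp [h]

theorem range_cast (n : Nat) :
    PySem.List.pyRange 0 (n : Int) 1 = (List.range n).map (fun k : Nat => (k : Int)) := by
  rw [PySem.List.pyRange_one]
  have h : ((n : Int) - 0).toNat = n := by omega
  rw [h]
  apply List.map_congr_left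
  intro k _
  omega

theorem range_dropLast (m : Nat) : (List.range m).dropLast = List.range (m - 1) := by
  cases m with
  | zero => rfl
  | succ n => rw [List.range_succ, List.dropLast_concat]; rfl

-- A computes map gfun over range (n-2)
theorem A_char (arr : List Int) :
    searchDelta arr = (List.range (arr.length - 2)).map (gfun arr) := by
  unfold searchDelta
  have h1 : PySem.List.pyRange 0 ((arr.length : Int) - 1) 1
      = (List.range (arr.length - 1)).map (fun k : Nat => (k : Int)) := by
    rw [PySem.List.pyRange_one]
    have h : ((arr.length : Int) - 1 - 0).toNat = arr.length - 1 := by omega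
    rw [h]
    apply List.map_congr_left
    intro k _
    omega
  rw [h1, List.foldl_map]
  have h2 : ∀ (out : List Int), ∀ k ∈ List.range (arr.length - 1),
      searchDeltaInner arr (k : Int) out (PySem.List.pyRange 0 (arr.length : Int) 1)
        = out ++ [gfun arr k] := by
    intro out k hk
    rw [List.mem_range] at hk
    have hkn : k < arr.length := by omega
    rw [range_cast, inner_eq_find, List.find?_map]
    have hpred : ((fun y => PySem.List.pyGetD arr (k : Int) 0 == PySem.List.pyGetD arr y 0)
        ∘ (fun j : Nat => (j : Int))) = (fun y : Nat => arr.getD k 0 == arr.getD y 0) := by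
      funext y; simp [PySem.List.pyGetD_natCast]
    rw [hpred]
    have hv : arr.getD k 0 = arr[k] := List.getD_eq_getElem arr 0 hkn
    have hmem : arr.getD k 0 ∈ arr := by rw [hv]; exact List.getElem_mem hkn
    rw [find_range arr _ hmem]
    have hle : fIdx (arr.getD k 0) arr ≤ k := fi_le arr _ k hkn hv.symm
    have habs : |((fIdx (arr.getD k 0) arr : Nat) : Int) - (k : Int)| = gfun arr k := by
      rw [abs_sub_comm, gfun,
        abs_of_nonneg (Int.sub_nonneg.mpr (by exact_mod_cast hle))]
    show out ++ [|((fIdx (arr.getD k 0) arr : Nat) : Int) - (k : Int)|] = out ++ [gfun arr k]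
    rw [habs]
  have houter : (List.range (arr.length - 1)).foldl
      (fun out (k : Nat) => searchDeltaInner arr (k : Int) out
        (PySem.List.pyRange 0 (arr.length : Int) 1)) []
      = (List.range (arr.length - 1)).map (gfun arr) := by
    have hcg := PySem.List.foldl_congr_mem (List.range (arr.length - 1)) _
      (fun out k => out ++ [gfun arr k]) [] (fun acc x hx => h2 acc x hx)
    rw [hcg, PySem.List.foldl_append_singleton_eq_map, List.nil_append]
  rw [houter, PySem.List.slice_to_neg_one, ← List.map_dropLast, range_dropLast]
  norm_num [Nat.sub_sub]

-- ===== B side =====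

-- the positions list B's dict stores for value v
def psL (arr : List Int) (v : Int) : List Int :=
  (((PySem.List.enumerate arr 0).filter (fun p => p.2 == v)).map (fun p => p.1))

theorem find_enum (v : Int) (t : List Int) (s : Int) (hv : v ∈ t) :
    (PySem.List.enumerate t s).find? (fun p => p.2 == v) = some (s + (fIdx v t : Int), v) := by
  induction t generalizing s with
  | nil => simp at hv
  | cons a r ih =>
    rw [PySem.List.enumerate_cons]
    by_cases ha : a = v
    · subst ha
      rw [List.find?_cons_of_pos (by simp)]
      simp [fIdx]
    · have hv' : v ∈ r := by
        rcases List.mem_cons.mp hv with h | h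
        · exact absurd h.symm ha
        · exact h
      rw [List.find?_cons_of_neg (by simpa using ha), ih (s + 1) hv']
      have : s + 1 + (fIdx v r : Int) = s + ((fIdx v r + 1 : Nat) : Int) := by push_cast; ring
      rw [this]
      simp [fIdx, ha]

theorem psL_head (arr : List Int) (v : Int) (hv : v ∈ arr) :
    PySem.List.pyGetD (psL arr v) 0 0 = ((fIdx v arr : Nat) : Int) := by
  have h1 : (psL arr v).head? = some ((fIdx v arr : Nat) : Int) := by
    unfold psL
    rw [List.head?_map, List.head?_filter, find_enum v arr 0 hv]
    simp
  rw [PySem.List.pyGetD_zero]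
  cases hps : psL arr v with
  | nil => rw [hps] at h1; simp at h1
  | cons a t =>
    rw [hps] at h1
    simp at h1
    simp [h1]

theorem mem_psL (arr : List Int) (v p : Int) :
    p ∈ psL arr v ↔ ∃ j : Nat, ∃ _ : j < arr.length, p = (j : Int) ∧ arr[j] = v := by
  unfold psL
  rw [List.mem_map]
  constructor
  · rintro ⟨q, hq, rfl⟩
    rw [List.mem_filter] at hq
    obtain ⟨hqe, hqv⟩ := hq
    rw [PySem.List.mem_enumerate_iff] at hqe
    obtain ⟨k, hk, rfl⟩ := hqe
    simp only [beq_iff_eq] at hqv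
    exact ⟨k, hk, by simp, hqv⟩
  · rintro ⟨j, hj, rfl, hv⟩
    refine ⟨((j : Int), arr[j]), ?_, rfl⟩
    rw [List.mem_filter]
    refine ⟨?_, by simp [hv]⟩
    rw [PySem.List.mem_enumerate_iff]
    exact ⟨j, hj, by simp⟩

theorem mem_psL_nat (arr : List Int) (v : Int) (i : Nat) (hi : i < arr.length) :
    ((i : Int) ∈ psL arr v) ↔ arr[i] = v := by
  rw [mem_psL]
  constructor
  · rintro ⟨j, hj, hji, hv⟩
    have : i = j := by exact_mod_cast hji
    subst this; exact hv
  · intro hv; exact ⟨i, hi, rfl, hv⟩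

-- one group's scatter: sets gf at its positions, leaves the rest
theorem scat_group (gf : Nat → Int) (f : Int) (ps : List Int) (res : List Int)
    (h : ∀ p ∈ ps, ∃ j : Nat, p = (j : Int) ∧ j < res.length ∧ p - f = gf j) :
    (ps.foldl (fun r p => PySem.List.pySetD r p (p - f)) res).length = res.length ∧
    ∀ i : Nat, i < res.length →
      (ps.foldl (fun r p => PySem.List.pySetD r p (p - f)) res).getD i 0
        = if (i : Int) ∈ ps then gf i else res.getD i 0 := by
  induction ps generalizing res with
  | nil => simp
  | cons p t ih =>
    obtain ⟨j, rfl, hj, hval⟩ := h p (List.mem_cons_self ..)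
    rw [List.foldl_cons, PySem.List.pySetD_natCast, hval]
    have hlen : (res.set j (gf j)).length = res.length := by simp
    have hrec := ih (res.set j (gf j)) (by
      intro q hq
      obtain ⟨k, hk1, hk2, hk3⟩ := h q (List.mem_cons_of_mem _ hq)
      exact ⟨k, hk1, by omega, hk3⟩)
    refine ⟨by rw [hrec.1, hlen], ?_⟩
    intro i hi
    rw [hrec.2 i (by omega)]
    by_cases hmem : (i : Int) ∈ t
    · rw [if_pos hmem, if_pos (List.mem_cons_of_mem _ hmem)]
    · rw [if_neg hmem]
      by_cases hij : i = j
      · subst hij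
        rw [if_pos (List.mem_cons_self ..), List.getD_eq_getElem _ 0 (by omega),
          List.getElem_set_self (by omega)]
      · have : ¬ ((i : Int) ∈ (j : Int) :: t) := by
          intro hc
          rcases List.mem_cons.mp hc with hc | hc
          · exact hij (by exact_mod_cast hc)
          · exact hmem hc
        rw [if_neg this, List.getD_eq_getElem _ 0 (by omega),
          List.getD_eq_getElem _ 0 (by omega), List.getElem_set, if_neg (by omega)]

-- scatter over a list of values: positions of processed values carry gfun, others keep res
theorem scat_all (arr : List Int) (vs : List Int) (res : List Int)
    (hlen : res.length = arr.length) (hvs : ∀ v ∈ vs, v ∈ arr) :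
    (vs.foldl (fun r v =>
        (psL arr v).foldl (fun r p => PySem.List.pySetD r p (p - PySem.List.pyGetD (psL arr v) 0 0)) r)
      res).length = res.length ∧
    ∀ i : Nat, i < res.length →
      (vs.foldl (fun r v =>
          (psL arr v).foldl (fun r p => PySem.List.pySetD r p (p - PySem.List.pyGetD (psL arr v) 0 0)) r)
        res).getD i 0
        = if arr.getD i 0 ∈ vs then gfun arr i else res.getD i 0 := by
  induction vs generalizing res with
  | nil => simp
  | cons v t ih =>
    have hva : v ∈ arr := hvs v (List.mem_cons_self ..)
    have hf : PySem.List.pyGetD (psL arr v) 0 0 = ((fIdx v arr : Nat) : Int) := psL_head arr v hva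
    have hgrp := scat_group (gfun arr) (PySem.List.pyGetD (psL arr v) 0 0) (psL arr v) res (by
      intro p hp
      obtain ⟨j, hj, rfl, hjv⟩ := (mem_psL arr v p).mp hp
      refine ⟨j, rfl, by omega, ?_⟩
      rw [hf, gfun, List.getD_eq_getElem arr 0 hj, hjv])
    rw [List.foldl_cons]
    set res1 := (psL arr v).foldl
      (fun r p => PySem.List.pySetD r p (p - PySem.List.pyGetD (psL arr v) 0 0)) res with hres1
    have hrec := ih res1 (by rw [hgrp.1, hlen]) (fun w hw => hvs w (List.mem_cons_of_mem _ hw))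
    refine ⟨by rw [hrec.1, hgrp.1], ?_⟩
    intro i hi
    rw [hrec.2 i (by rw [hgrp.1]; omega), hgrp.2 i hi]
    have hiv : ((i : Int) ∈ psL arr v) ↔ arr.getD i 0 = v := by
      rw [mem_psL_nat arr v i (by omega), List.getD_eq_getElem arr 0 (by omega)]
    by_cases hmem : arr.getD i 0 ∈ t
    · rw [if_pos hmem, if_pos (List.mem_cons_of_mem _ hmem)]
    · rw [if_neg hmem]
      by_cases heq : arr.getD i 0 = v
      · rw [if_pos (hiv.mpr heq), if_pos (List.mem_cons.mpr (Or.inl heq))]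
      · have hnc : ¬ arr.getD i 0 ∈ v :: t := by
          rw [List.mem_cons]; push Not; exact ⟨heq, hmem⟩
        rw [if_neg (fun hc => heq (hiv.mp hc)), if_neg hnc]

-- the truncation [:len(arr)-2] is take (len-2) on a list of that length
theorem trunc_eq (l : List Int) :
    PySem.List.slice l none (some ((l.length : Int) - 2)) = l.take (l.length - 2) := by
  by_cases h : 2 ≤ l.length
  · have hc : (l.length : Int) - 2 = ((l.length - 2 : Nat) : Int) := by omega
    rw [hc, PySem.List.slice_to_natCast]
  · have h01 : l.length = 0 ∨ l.length = 1 := by omega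
    rcases h01 with h0 | h1
    · rw [List.length_eq_zero_iff.mp h0]; rfl
    · obtain ⟨a, rfl⟩ := List.length_eq_one_iff.mp h1
      norm_num [PySem.List.slice_to_neg_one]

theorem B_char (arr : List Int) :
    searchDelta_alt arr = (List.range (arr.length - 2)).map (gfun arr) := by
  unfold searchDelta_alt
  show PySem.List.slice
      ((((PySem.List.enumerate arr 0).foldl
          (fun (d : PySem.Dict Int (List Int)) p => d.modify p.2 [] (fun l => l ++ [p.1]))
          PySem.Dict.empty).values).foldl
        (fun res ps =>
          ps.foldl (fun res p => PySem.List.pySetD res p (p - PySem.List.pyGetD ps 0 0)) res)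
        (List.replicate arr.length 0)) none (some ((arr.length : Int) - 2))
    = (List.range (arr.length - 2)).map (gfun arr)
  set groups := (PySem.List.enumerate arr 0).foldl
    (fun (d : PySem.Dict Int (List Int)) p => d.modify p.2 [] (fun l => l ++ [p.1]))
    PySem.Dict.empty with hgroups
  have hkeys : groups.keys = PySem.Set.ofList arr := by
    rw [hgroups,
      PySem.Dict.keys_foldl_modify_key (PySem.List.enumerate arr 0) Prod.snd []
        (fun _ p l => l ++ [p.1]) PySem.Dict.empty,
      PySem.Dict.keys_empty, PySem.Set.update_nil_left, PySem.List.map_snd_enumerate]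
  have hnodup : groups.keys.Nodup := by
    rw [hkeys]; exact PySem.Set.nodup_ofList arr
  have hgetD : ∀ v : Int, groups.getD v [] = psL arr v := by
    intro v
    have hswap : groups = ((PySem.List.enumerate arr 0).map (fun p => (p.2, p.1))).foldl
        (fun (d : PySem.Dict Int (List Int)) p => d.modify p.1 [] (fun l => l ++ [p.2]))
        PySem.Dict.empty := by
      rw [hgroups, List.foldl_map]
    rw [hswap, PySem.Dict.getD_foldl_modify_append, PySem.Dict.getD_empty, List.nil_append, psL,
      List.filter_map, List.map_map]
    rfl
  have hvals : groups.values = groups.keys.map (fun v => psL arr v) := by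
    rw [PySem.Dict.values_eq_map_keys groups hnodup ([] : List Int)]
    exact List.map_congr_left (fun v _ => hgetD v)
  rw [hvals, List.foldl_map]
  have hmemkeys : ∀ v ∈ groups.keys, v ∈ arr := by
    intro v hv; rw [hkeys] at hv; exact (PySem.Set.mem_ofList arr v).mp hv
  have hscat := scat_all arr groups.keys (List.replicate arr.length 0)
    (by simp) hmemkeys
  set res := groups.keys.foldl (fun r v =>
      (psL arr v).foldl (fun r p => PySem.List.pySetD r p (p - PySem.List.pyGetD (psL arr v) 0 0)) r)
    (List.replicate arr.length 0) with hres
  have hreslen : res.length = arr.length := by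
    rw [hres, hscat.1, List.length_replicate]
  have hresval : ∀ i : Nat, i < arr.length → res.getD i 0 = gfun arr i := by
    intro i hi
    rw [hres, hscat.2 i (by simpa using hi)]
    have hcov : arr.getD i 0 ∈ groups.keys := by
      rw [hkeys, PySem.Set.mem_ofList, List.getD_eq_getElem arr 0 hi]
      exact List.getElem_mem hi
    rw [if_pos hcov]
  have hreseq : res = (List.range arr.length).map (gfun arr) := by
    apply List.ext_getElem
    · simp [hreslen]
    · intro i h1 h2
      have hi : i < arr.length := by rwa [hreslen] at h1
      rw [← List.getD_eq_getElem res 0 h1, hresval i hi]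
      simp
  have hslice : PySem.List.slice res none (some ((arr.length : Int) - 2))
      = res.take (arr.length - 2) := by
    have := trunc_eq res
    rwa [hreslen] at this
  rw [hslice, hreseq, ← List.map_take, List.take_range, min_eq_left (Nat.sub_le _ _)]

-- ===== VERDICT (by name: the statement is the Claim_ definition above) =====
theorem searchDelta_spec : Claim_equal_searchDelta := by
  intro arr _
  unfold Spec_searchDelta
  rw [A_char, B_char]
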